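-- pv_equiv track=rewrite | github.com/nikolashermanns-netizen/Bestell_Bot_Voice | sip/audio_bridge.py | _encode_alaw_sample
-- ===== SOURCE A (Python) =====
-- def _encode_alaw_sample(sample: int) -> int:
--     """Encodiert einen Sample-Wert zu a-law."""
--     CLIP = 32635
--
--     if sample > CLIP:
--         sample = CLIP
--     elif sample < -CLIP:
--         sample = -CLIP
--
--     if sample < 0:
--         sign = 0x80
--         sample = -sample
--     else:
--         sign = 0
--
--     if sample < 256:
--         exponent = 0
--         mantissa = sample >> 4
--     else:
--         exponent = 1
--         while sample >= (512 << exponent):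
--             exponent += 1
--             if exponent >= 7:
--                 break
--         mantissa = (sample >> (exponent + 3)) & 0x0F
--
--     alaw_byte = (sign | (exponent << 4) | mantissa) ^ 0x55
--
--     return alaw_byte
-- ===== SOURCE B (Python) =====
-- def _encode_alaw_sample(sample: int) -> int:
--     """Encodiert einen Sample-Wert zu a-law (closed-form exponent via bit_length)."""
--     CLIP = 32635
--     s = min(max(sample, -CLIP), CLIP)
--     sign = 0x80 if s < 0 else 0
--     mag = abs(s)
--     if mag < 256:
--         exponent = 0
--         mantissa = mag >> 4
--     else:
--         exponent = min(7, max(1, mag.bit_length() - 9))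
--         mantissa = (mag >> (exponent + 3)) & 0x0F
--     return (sign | (exponent << 4) | mantissa) ^ 0x55
-- ===== Notes on version B (the rewrite author's own statement) =====
-- stated objective: simpler
-- what changed: Replaced the exponent-search while-loop with a closed-form exponent computed from the magnitude's bit length (min(7, max(1, bit_length-9))), and the clip/sign if-chains with min/max/abs.
import Mathlib
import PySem

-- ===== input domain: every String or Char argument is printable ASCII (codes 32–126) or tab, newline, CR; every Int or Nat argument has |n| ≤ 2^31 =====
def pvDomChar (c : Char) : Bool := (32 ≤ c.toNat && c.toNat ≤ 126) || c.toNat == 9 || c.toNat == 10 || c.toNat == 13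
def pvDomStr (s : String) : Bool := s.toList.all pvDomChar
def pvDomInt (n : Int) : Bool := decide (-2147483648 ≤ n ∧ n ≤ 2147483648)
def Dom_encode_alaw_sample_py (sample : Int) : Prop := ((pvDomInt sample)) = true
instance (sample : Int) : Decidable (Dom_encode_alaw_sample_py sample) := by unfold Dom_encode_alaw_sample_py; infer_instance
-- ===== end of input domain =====

-- B replaces A's exponent-search while-loop by a closed-form exponent from the magnitude's
-- bit length (objective: simpler — no loop).

-- ===== PORT A =====
-- the while-loop: starts at exponent = 1; increments while sample >= 512 << exponent,
-- breaking once exponent reaches 7. Fuel 7 strictly exceeds the at most 6 iterations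
-- the break allows, so the fuel never runs out and the port is exact.
def encLoopA (sample : Int) (fuel : Nat) (exponent : Int) : Int :=
  match fuel with
  | 0 => exponent
  | fuel + 1 =>
    if sample ≥ 512 <<< exponent then
      let exponent := exponent + 1
      if exponent ≥ 7 then exponent
      else encLoopA sample fuel exponent
    else exponent

def encode_alaw_sample_py (sample : Int) : Int :=
  let s1 : Int := if sample > 32635 then 32635 else if sample < -32635 then -32635 else sample
  let sign : Int := if s1 < 0 then 0x80 else 0
  let s2 : Int := if s1 < 0 then -s1 else s1
  let em : Int × Int :=
    if s2 < 256 then (0, s2 >>> (4:Int))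
    else
      let exponent := encLoopA s2 7 1
      (exponent, Int.land (s2 >>> (exponent + 3)) 0x0F)
  Int.xor (Int.lor (Int.lor sign (em.1 <<< (4:Int))) em.2) 0x55

-- ===== PORT B =====
-- Python's mag.bit_length() for mag > 0 is Nat.log2 mag + 1 (exact on the branch where it
-- is used, since there mag ≥ 256 > 0).
def encode_alaw_sample_py_alt (sample : Int) : Int :=
  let s : Int := min (max sample (-32635)) 32635
  let sign : Int := if s < 0 then 0x80 else 0
  let mag : Int := |s|
  let em : Int × Int :=
    if mag < 256 then (0, mag >>> (4:Int))
    else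
      let exponent : Int := min 7 (max 1 ((Nat.log2 mag.natAbs : Int) + 1 - 9))
      (exponent, Int.land (mag >>> (exponent + 3)) 0x0F)
  Int.xor (Int.lor (Int.lor sign (em.1 <<< (4:Int))) em.2) 0x55

-- ===== PRECONDITION & SPEC =====
def Spec_encode_alaw_sample_py (sample : Int) (out : Int) : Prop := out = encode_alaw_sample_py_alt sample
instance (sample : Int) (out : Int) : Decidable (Spec_encode_alaw_sample_py sample out) := by unfold Spec_encode_alaw_sample_py; infer_instance

-- ===== CLAIM (what is proved, stated in full; the proofs are below) =====
def Claim_equal_encode_alaw_sample_py : Prop := ∀ (sample : Int), Dom_encode_alaw_sample_py sample → Spec_encode_alaw_sample_py sample (encode_alaw_sample_py sample)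

-- ===== LEMMAS AND PROOFS =====

lemma log2_eq (n k : Nat) (h1 : 2 ^ k ≤ n) (h2 : n < 2 ^ (k + 1)) : Nat.log2 n = k := by
  rw [Nat.log2_eq_log_two]
  exact Nat.log_eq_of_pow_le_of_lt_pow h1 h2

lemma sh1 : (512:Int) <<< (1:Int) = 1024 := by decide
lemma sh2 : (512:Int) <<< (2:Int) = 2048 := by decide
lemma sh3 : (512:Int) <<< (3:Int) = 4096 := by decide
lemma sh4 : (512:Int) <<< (4:Int) = 8192 := by decide
lemma sh5 : (512:Int) <<< (5:Int) = 16384 := by decide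
lemma sh6 : (512:Int) <<< (6:Int) = 32768 := by decide

lemma exp_eq (m : Int) (h2 : 256 ≤ m) (h3 : m ≤ 32635) :
    encLoopA m 7 1 = min 7 (max 1 ((Nat.log2 m.natAbs : Int) + 1 - 9)) := by
  have hb : ∀ k : Nat, 2 ^ k ≤ m.natAbs → m.natAbs < 2 ^ (k + 1) → Nat.log2 m.natAbs = k :=
    fun k a b => log2_eq _ k a b
  rcases lt_or_ge m 512 with h | h
  · have hy : Nat.log2 m.natAbs = 8 := hb 8 (by simp; omega) (by simp; omega)
    simp only [encLoopA]
    norm_num [sh1, hy]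
    omega
  · rcases lt_or_ge m 1024 with h' | h'
    · have hy : Nat.log2 m.natAbs = 9 := hb 9 (by simp; omega) (by simp; omega)
      simp only [encLoopA]
      norm_num [sh1, hy]
      omega
    · rcases lt_or_ge m 2048 with h'' | h''
      · have hy : Nat.log2 m.natAbs = 10 := hb 10 (by simp; omega) (by simp; omega)
        simp only [encLoopA]
        norm_num [sh1, sh2, hy]
        omega
      · rcases lt_or_ge m 4096 with h3' | h3'
        · have hy : Nat.log2 m.natAbs = 11 := hb 11 (by simp; omega) (by simp; omega)
          simp only [encLoopA]
          norm_num [sh1, sh2, sh3, hy]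
          omega
        · rcases lt_or_ge m 8192 with h4' | h4'
          · have hy : Nat.log2 m.natAbs = 12 := hb 12 (by simp; omega) (by simp; omega)
            simp only [encLoopA]
            norm_num [sh1, sh2, sh3, sh4, hy]
            omega
          · rcases lt_or_ge m 16384 with h5' | h5'
            · have hy : Nat.log2 m.natAbs = 13 := hb 13 (by simp; omega) (by simp; omega)
              simp only [encLoopA]
              norm_num [sh1, sh2, sh3, sh4, sh5, hy]
              omega
            · have hy : Nat.log2 m.natAbs = 14 := hb 14 (by simp; omega) (by simp; omega)
              simp only [encLoopA]
              norm_num [sh1, sh2, sh3, sh4, sh5, sh6, hy]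
              omega

-- ===== VERDICT (by name: the statement is the Claim_ definition above) =====
theorem encode_alaw_sample_py_spec : Claim_equal_encode_alaw_sample_py := by
  intro sample _
  unfold Spec_encode_alaw_sample_py encode_alaw_sample_py encode_alaw_sample_py_alt
  have hclip : min (max sample (-32635)) 32635
      = (if sample > 32635 then (32635:Int) else if sample < -32635 then -32635 else sample) := by
    split_ifs <;> omega
  rw [hclip]
  generalize hA : (if sample > 32635 then (32635:Int) else if sample < -32635 then -32635 else sample) = s
  have hlb : -32635 ≤ s := by rw [← hA]; split_ifs <;> omega
  have hub : s ≤ 32635 := by rw [← hA]; split_ifs <;> omega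
  by_cases hneg : s < 0
  · simp only [if_pos hneg, abs_of_neg hneg]
    by_cases hsm : -s < 256
    · simp only [if_pos hsm]
    · simp only [if_neg hsm]
      rw [exp_eq (-s) (by omega) (by omega)]
  · simp only [if_neg hneg, abs_of_nonneg (by omega : (0:Int) ≤ s)]
    by_cases hsm : s < 256
    · simp only [if_pos hsm]
    · simp only [if_neg hsm]
      rw [exp_eq s (by omega) (by omega)]
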